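-- pv_equiv track=rewrite | github.com/wannabetter/LeetCode | 2008.py | maxTaxiEarnings
-- ===== SOURCE A (Python) =====
-- import bisect
-- from typing import List
--
-- def maxTaxiEarnings(n: int, rides: List[List[int]]) -> int:
--     rides.sort(key=lambda r:r[1])
--     m = len(rides)
--     dp = [0] * (m+1)
--     for i in range(m):
--         j = bisect.bisect_right(rides,rides[i][0],hi=i,key=lambda r:r[1])
--         dp[i + 1] = max(dp[i], dp[j] + rides[i][1] - rides[i][0] + rides[i][2])
--     return dp[m]
-- ===== SOURCE B (Python) =====
-- def maxTaxiEarnings(n, rides):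
--     rides.sort(key=lambda r: r[1])
--     take = []  # take[k] = best earnings of a schedule whose last ride is ride k
--     for k in range(len(rides)):
--         r = rides[k]
--         prev = 0
--         for j in range(k):
--             if rides[j][1] <= r[0] and take[j] > prev:
--                 prev = take[j]
--         take.append(prev + r[1] - r[0] + r[2])
--     return max([0] + take)
-- ===== Notes on version B (the rewrite author's own statement) =====
-- stated objective: alternative
-- what changed: Replaces the prefix-maximum dp array with per-ride binary search by a per-ride 'best schedule ending with ride k' table filled by a direct compatibility scan, taking the overall max at the end; no bisect and no dp-monotonicity trick.
-- outside the precondition, e.g. on maxTaxiEarnings(5, [[1, 4]]): A raises IndexError, B raises IndexError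
import Mathlib
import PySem

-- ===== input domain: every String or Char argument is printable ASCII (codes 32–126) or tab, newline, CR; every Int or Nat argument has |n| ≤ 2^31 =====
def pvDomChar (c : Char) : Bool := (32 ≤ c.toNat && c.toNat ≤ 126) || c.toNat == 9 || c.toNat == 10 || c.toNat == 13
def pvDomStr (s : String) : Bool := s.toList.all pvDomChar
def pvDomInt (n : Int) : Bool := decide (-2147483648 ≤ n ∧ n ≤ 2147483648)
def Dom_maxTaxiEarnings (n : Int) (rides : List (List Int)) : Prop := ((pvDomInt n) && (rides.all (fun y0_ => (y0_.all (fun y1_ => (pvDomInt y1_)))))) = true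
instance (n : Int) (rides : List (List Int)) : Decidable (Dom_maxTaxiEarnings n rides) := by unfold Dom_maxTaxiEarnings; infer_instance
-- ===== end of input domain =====

-- B replaces the prefix-max dp array + per-ride bisect by a direct "best schedule ending with ride k"
-- table filled by a compatibility scan (objective: alternative decomposition, not faster).
-- Both A and B sort `rides` in place with the same key, so the observable mutation is identical;
-- the equivalence proved here is about the return value.

-- ===== PORT A =====
-- sort key lambda r: r[1]; total here via getD (Pre_ guarantees every ride has length ≥ 3)
def pvKey (r : List Int) : Int := r.getD 1 0

def pvStepA (s : List (List Int)) (dp : List Int) (i : Nat) : List Int :=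
  let ri := s.getD i []
  -- j = bisect.bisect_right(rides, rides[i][0], hi=i, key=lambda r: r[1])
  let j := PySem.List.bisectRight ((s.take i).map pvKey) (ri.getD 0 0)
  -- dp[i+1] = max(dp[i], dp[j] + rides[i][1] - rides[i][0] + rides[i][2])
  dp.set (i + 1) (max (dp.getD i 0) (dp.getD j 0 + ri.getD 1 0 - ri.getD 0 0 + ri.getD 2 0))

def maxTaxiEarnings (n : Int) (rides : List (List Int)) : Int :=
  let s := PySem.List.sorted rides pvKey
  let m := s.length
  let dp := (List.range m).foldl (pvStepA s) (List.replicate (m + 1) (0 : Int))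
  dp.getD m 0

-- ===== PORT B =====
def pvStepB (s : List (List Int)) (tk : List Int) (k : Nat) : List Int :=
  let r := s.getD k []
  let prev := (List.range k).foldl
    (fun prev j =>
      if (s.getD j []).getD 1 0 ≤ r.getD 0 0 ∧ tk.getD j 0 > prev then tk.getD j 0 else prev) 0
  tk ++ [prev + r.getD 1 0 - r.getD 0 0 + r.getD 2 0]

def maxTaxiEarnings_alt (n : Int) (rides : List (List Int)) : Int :=
  let s := PySem.List.sorted rides pvKey
  let take := (List.range s.length).foldl (pvStepB s) []
  -- max([0] + take)
  take.foldl max 0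

-- ===== PRECONDITION & SPEC =====
-- Pre_ excludes exactly the inputs on which A raises IndexError: some ride with fewer than 3 entries
-- (the sort key reads r[1] and the dp body reads r[0], r[1], r[2]); B raises there too.
def Pre_maxTaxiEarnings (n : Int) (rides : List (List Int)) : Prop :=
  ∀ r ∈ rides, 3 ≤ r.length
instance (n : Int) (rides : List (List Int)) : Decidable (Pre_maxTaxiEarnings n rides) := by
  unfold Pre_maxTaxiEarnings; infer_instance

def pvWitness_maxTaxiEarnings : Int × List (List Int) := (5, [[1, 4, 2], [2, 3, 1]])

def Spec_maxTaxiEarnings (n : Int) (rides : List (List Int)) (out : Int) : Prop := out = maxTaxiEarnings_alt n rides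
instance (n : Int) (rides : List (List Int)) (out : Int) : Decidable (Spec_maxTaxiEarnings n rides out) := by unfold Spec_maxTaxiEarnings; infer_instance

-- ===== CLAIM (what is proved, stated in full; the proofs are below) =====
def Claim_equal_maxTaxiEarnings : Prop := ∀ (n : Int) (rides : List (List Int)), Dom_maxTaxiEarnings n rides → Pre_maxTaxiEarnings n rides → Spec_maxTaxiEarnings n rides (maxTaxiEarnings n rides)

-- ===== LEMMAS AND PROOFS =====

-- fold over range (j+d) where the step is the identity from index j on
lemma pv_foldl_range_skip (f : Int → Nat → Int) (z : Int) (j : Nat) :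
    ∀ d, (∀ k, j ≤ k → k < j + d → ∀ p, f p k = p) →
      (List.range (j + d)).foldl f z = (List.range j).foldl f z := by
  intro d
  induction d with
  | zero => intro _; rfl
  | succ d ih =>
    intro h
    rw [show j + (d + 1) = (j + d) + 1 by omega, List.range_succ, List.foldl_append]
    simp only [List.foldl_cons, List.foldl_nil]
    rw [h (j + d) (Nat.le_add_right j d) (by omega)]
    exact ih (fun k hk1 hk2 p => h k hk1 (by omega) p)

-- the conditional-update fold is the max fold when the condition holds throughout
lemma pv_foldl_cond_eq_max (tk : List Int) (c : Nat → Prop) [DecidablePred c] :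
    ∀ j, (∀ k, k < j → c k) →
      (List.range j).foldl (fun p k => if c k ∧ tk.getD k 0 > p then tk.getD k 0 else p) 0
        = (List.range j).foldl (fun p k => max p (tk.getD k 0)) 0 := by
  intro j
  induction j with
  | zero => intro _; rfl
  | succ j ih =>
    intro hc
    rw [List.range_succ, List.foldl_append, List.foldl_append]
    simp only [List.foldl_cons, List.foldl_nil]
    rw [ih (fun k hk => hc k (by omega))]
    by_cases h : tk.getD j 0 > (List.range j).foldl (fun p k => max p (tk.getD k 0)) 0
    · rw [if_pos ⟨hc j (by omega), h⟩]
      exact (max_eq_right (le_of_lt h)).symm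
    · rw [if_neg (fun hh => h hh.2)]
      exact (max_eq_left (not_lt.mp h)).symm

lemma pv_take_eq_map_range (tk : List Int) (j : Nat) (h : j ≤ tk.length) :
    tk.take j = (List.range j).map (fun k => tk.getD k 0) := by
  apply List.ext_getElem
  · simp [h]
  · intro i h1 h2
    simp at h1
    simp [List.getD_eq_getElem?_getD, List.getElem?_eq_getElem (by omega : i < tk.length)]

lemma pv_foldl_max_take (tk : List Int) (j : Nat) (h : j ≤ tk.length) :
    (List.range j).foldl (fun p k => max p (tk.getD k 0)) 0 = (tk.take j).foldl max 0 := by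
  rw [pv_take_eq_map_range tk j h, List.foldl_map]

-- B's inner scan computes dp[j] of A, where j is A's bisect index
lemma pv_prev_eq (s : List (List Int)) (hs : List.Pairwise (fun a b => pvKey a ≤ pvKey b) s)
    (i : Nat) (hi : i < s.length) (tk : List Int) (htk : tk.length = i) :
    PySem.List.bisectRight ((s.take i).map pvKey) ((s.getD i []).getD 0 0) ≤ i ∧
    (List.range i).foldl
      (fun p k => if (s.getD k []).getD 1 0 ≤ (s.getD i []).getD 0 0 ∧ tk.getD k 0 > p
                  then tk.getD k 0 else p) 0
      = (tk.take (PySem.List.bisectRight ((s.take i).map pvKey) ((s.getD i []).getD 0 0))).foldl max 0 := by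
  set x := (s.getD i []).getD 0 0 with hx
  set ks := (s.take i).map pvKey with hks
  have hlen : ks.length = i := by simp [hks, Nat.min_eq_left (le_of_lt hi)]
  have hpair : List.Pairwise (· ≤ ·) ks := by
    rw [hks, List.pairwise_map]
    exact hs.sublist (List.take_sublist i s)
  obtain ⟨hj_le, hlt, hge⟩ := PySem.List.bisectRight_spec ks x hpair
  set j := PySem.List.bisectRight ks x with hj
  have hji : j ≤ i := hlen ▸ hj_le
  have hksk : ∀ k, (h : k < i) → ks[k]'(by omega) = (s.getD k []).getD 1 0 := by
    intro k hk
    have hkl : k < s.length := Nat.lt_of_lt_of_le hk (le_of_lt hi)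
    simp [hks, List.getElem_map, List.getElem_take, pvKey,
      List.getD_eq_getElem?_getD, List.getElem?_eq_getElem hkl]
  refine ⟨hji, ?_⟩
  have hcond_true : ∀ k, k < j → (s.getD k []).getD 1 0 ≤ x := by
    intro k hk
    have h1 : k < ks.length := Nat.lt_of_lt_of_le hk hj_le
    have h2 := hlt k h1 hk
    rw [hksk k (hlen ▸ h1)] at h2
    exact h2
  have hcond_false : ∀ k, j ≤ k → k < i → ¬ ((s.getD k []).getD 1 0 ≤ x) := by
    intro k hk1 hk2
    have h1 : k < ks.length := hlen.symm ▸ hk2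
    have h2 := hge k h1 hk1
    rw [hksk k hk2] at h2
    omega
  have hskip := pv_foldl_range_skip
    (fun p k => if (s.getD k []).getD 1 0 ≤ x ∧ tk.getD k 0 > p then tk.getD k 0 else p)
    0 j (i - j)
    (fun k hk1 hk2 p => by
      have hki : k < i := (Nat.add_sub_cancel' hji) ▸ hk2
      exact if_neg (fun hh => hcond_false k hk1 hki hh.1))
  rw [Nat.add_sub_cancel' hji] at hskip
  rw [hskip, pv_foldl_cond_eq_max tk (fun k => (s.getD k []).getD 1 0 ≤ x) j hcond_true,
    pv_foldl_max_take tk j (htk.symm ▸ hji)]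

-- loop states
def pvDpA (s : List (List Int)) (i : Nat) : List Int :=
  (List.range i).foldl (pvStepA s) (List.replicate (s.length + 1) (0 : Int))

def pvTkB (s : List (List Int)) (i : Nat) : List Int :=
  (List.range i).foldl (pvStepB s) []

lemma pv_invariant (s : List (List Int)) (hs : List.Pairwise (fun a b => pvKey a ≤ pvKey b) s) :
    ∀ i, i ≤ s.length →
      (pvDpA s i).length = s.length + 1 ∧ (pvTkB s i).length = i ∧
      ∀ t, t ≤ i → (pvDpA s i).getD t 0 = ((pvTkB s i).take t).foldl max 0 := by
  intro i
  induction i with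
  | zero =>
    intro _
    refine ⟨by simp [pvDpA], by simp [pvTkB], ?_⟩
    intro t ht
    interval_cases t
    simp [pvDpA, pvTkB]
  | succ i ih =>
    intro hi1
    obtain ⟨hlA, hlB, hIH⟩ := ih (by omega)
    have hi : i < s.length := by omega
    have hA : pvDpA s (i + 1) = pvStepA s (pvDpA s i) i := by
      simp [pvDpA, List.range_succ]
    have hB : pvTkB s (i + 1) = pvStepB s (pvTkB s i) i := by
      simp [pvTkB, List.range_succ]
    obtain ⟨hji, hprev⟩ := pv_prev_eq s hs i hi (pvTkB s i) hlB
    set j := PySem.List.bisectRight ((s.take i).map pvKey) ((s.getD i []).getD 0 0) with hjdef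
    set ri := s.getD i [] with hri
    set p := ri.getD 1 0 - ri.getD 0 0 + ri.getD 2 0 with hp
    set prev := (List.range i).foldl
      (fun prev k => if (s.getD k []).getD 1 0 ≤ ri.getD 0 0 ∧ (pvTkB s i).getD k 0 > prev
                     then (pvTkB s i).getD k 0 else prev) 0 with hprevdef
    have hstepA : pvDpA s (i + 1)
        = (pvDpA s i).set (i + 1)
            (max ((pvDpA s i).getD i 0) ((pvDpA s i).getD j 0 + p)) := by
      rw [hA]; simp only [pvStepA]; rw [← hri, ← hjdef, hp]; ring_nf
    have hstepB : pvTkB s (i + 1) = pvTkB s i ++ [prev + p] := by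
      rw [hB]; simp only [pvStepB]; rw [← hri, ← hprevdef, hp]; ring_nf
    have hdpj : (pvDpA s i).getD j 0 = prev := by
      rw [hIH j hji]; exact hprev.symm
    have hdpi : (pvDpA s i).getD i 0 = (pvTkB s i).foldl max 0 := by
      rw [hIH i (le_refl i), List.take_of_length_le (by omega)]
    refine ⟨by rw [hstepA]; simp [hlA], by rw [hstepB]; simp [hlB], ?_⟩
    intro t ht
    rcases Nat.lt_or_ge t (i + 1) with hti | hti
    · -- t ≤ i : untouched entry, untouched prefix
      rw [hstepA, hstepB]
      rw [List.take_append_of_le_length (by omega)]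
      rw [List.getD_eq_getElem?_getD, List.getElem?_set_ne (by omega : i + 1 ≠ t),
        ← List.getD_eq_getElem?_getD, hIH t (by omega)]
    · -- t = i + 1
      have ht1 : t = i + 1 := by omega
      subst ht1
      rw [hstepA, hstepB]
      have hset : ((pvDpA s i).set (i + 1)
          (max ((pvDpA s i).getD i 0) ((pvDpA s i).getD j 0 + p))).getD (i + 1) 0
          = max ((pvDpA s i).getD i 0) ((pvDpA s i).getD j 0 + p) := by
        rw [List.getD_eq_getElem?_getD, List.getElem?_set_self (by omega : i + 1 < (pvDpA s i).length)]
        rfl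
      rw [hset, List.take_of_length_le (by simp [hlB]), List.foldl_append]
      simp only [List.foldl_cons, List.foldl_nil]
      rw [hdpj, hdpi]

theorem maxTaxiEarnings_spec : Claim_equal_maxTaxiEarnings := by
  intro n rides _ _
  unfold Spec_maxTaxiEarnings maxTaxiEarnings maxTaxiEarnings_alt
  set s := PySem.List.sorted rides pvKey with hsdef
  have hs : List.Pairwise (fun a b => pvKey a ≤ pvKey b) s :=
    PySem.List.sorted_pairwise rides pvKey
  obtain ⟨_, hlB, hIH⟩ := pv_invariant s hs s.length (le_refl _)
  have := hIH s.length (le_refl _)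
  rw [List.take_of_length_le (by omega)] at this
  simpa [pvDpA, pvTkB] using this
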